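-- pv_equiv track=rewrite | github.com/FedericoValsagna/TP-TDA | Ejercicio 2/main.py | ej2
-- ===== SOURCE A (Python) =====
-- def ej2(arr):
--     subarreglos = []
--     i = 0
--     while i < len(arr):
--         sumatoria = 0
--         punto_de_quiebre = None
--         for j in range(i, len(arr)):
--             if sumatoria > 0:
--                 if sumatoria + arr[j] <= 0:
--                     punto_de_quiebre = j
--             sumatoria += arr[j]
--         if sumatoria > 0:
--             subarreglos.append(arr[i:len(arr)])
--             break
--         elif punto_de_quiebre is not None:
--             subarreglos.append(arr[i: punto_de_quiebre])
--             i = punto_de_quiebre + 1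
--         else:
--             i += 1
--     return len(subarreglos)
-- ===== SOURCE B (Python) =====
-- def ej2(arr):
--     n = len(arr)
--     P = [0]
--     for x in arr:
--         P.append(P[-1] + x)
--     S = _sufmax(P[:n])
--     count = 0
--     i = 0
--     while i < n:
--         if P[n] > P[i]:
--             return count + 1
--         lo, hi, ans = i + 1, n - 1, None
--         while lo <= hi:
--             mid = (lo + hi) // 2
--             if S[mid] > P[i]:
--                 ans, lo = mid, mid + 1
--             else:
--                 hi = mid - 1
--         if ans is None:
--             i += 1
--         else:
--             count += 1
--             i = ans + 1
--     return count
--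
-- def _sufmax(ps):
--     out = []
--     m = None
--     for p in reversed(ps):
--         m = p if m is None else max(p, m)
--         out.append(m)
--     out.reverse()
--     return out
-- ===== Notes on version B (the rewrite author's own statement) =====
-- stated objective: alternative
-- what changed: B computes prefix sums once, precomputes suffix maxima of the prefix-sum array, and finds each segment's last positive-to-nonpositive crossing by a binary search on the non-increasing suffix-maximum array, instead of A's full rescan of the remaining suffix (with a fresh running sum) at every outer step.
import Mathlib
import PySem

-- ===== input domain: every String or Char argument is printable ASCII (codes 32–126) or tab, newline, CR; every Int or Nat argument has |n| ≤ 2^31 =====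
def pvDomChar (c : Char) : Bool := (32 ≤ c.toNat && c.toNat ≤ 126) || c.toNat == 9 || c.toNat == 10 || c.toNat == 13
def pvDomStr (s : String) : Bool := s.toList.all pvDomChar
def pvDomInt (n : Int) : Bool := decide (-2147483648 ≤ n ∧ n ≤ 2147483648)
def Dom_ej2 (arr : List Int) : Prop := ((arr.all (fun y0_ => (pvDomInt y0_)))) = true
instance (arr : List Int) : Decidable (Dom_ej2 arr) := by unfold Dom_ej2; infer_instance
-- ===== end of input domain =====

-- B replaces A's full rescan of the remaining suffix at each outer step by prefix sums,
-- suffix maxima of the prefix sums, and a binary search for the last crossing (objective: alternative).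

-- ===== PORT A =====
-- inner 'for j in range(i, len(arr))' loop of A: state (sumatoria, punto_de_quiebre)
def ej2Inner (arr : List Int) (i : Nat) : Int × Option Int :=
  (PySem.List.pyRange (i : Int) (arr.length : Int) 1).foldl
    (fun st j =>
      (st.1 + PySem.List.pyGetD arr j 0,
       if 0 < st.1 then
         (if st.1 + PySem.List.pyGetD arr j 0 ≤ 0 then some j else st.2)
       else st.2))
    (0, none)

-- outer 'while i < len(arr)' loop of A, accumulating 'subarreglos'
def ej2Go (arr : List Int) : Nat → Nat → List (List Int) → List (List Int)
  | 0, _, subs => subs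
  | fuel + 1, i, subs =>
    if i < arr.length then
      let r := ej2Inner arr i
      if 0 < r.1 then
        subs ++ [PySem.List.slice arr (some (i : Int)) (some (arr.length : Int))]
      else
        match r.2 with
        | some pq => ej2Go arr fuel (pq + 1).toNat (subs ++ [PySem.List.slice arr (some (i : Int)) (some pq)])
        | none => ej2Go arr fuel (i + 1) subs
    else subs

def ej2 (arr : List Int) : Int := ((ej2Go arr (arr.length + 1) 0 []).length : Int)

-- ===== PORT B =====
-- P = [0]; for x in arr: P.append(P[-1] + x)
def buildP (arr : List Int) : List Int :=
  arr.foldl (fun P x => P ++ [PySem.List.pyGetD P (-1) 0 + x]) [0]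

-- _sufmax: reversed scan collecting running maxima, then reverse
def sufmax (ps : List Int) : List Int :=
  ((ps.reverse).foldl (fun (st : List Int × Option Int) p =>
      let m := match st.2 with | none => p | some q => max p q
      (st.1 ++ [m], some m)) ([], none)).1.reverse

-- the inner 'while lo <= hi' binary-search loop of B (fuel bounds the iteration count)
def bsearchGo (S : List Int) (v : Int) : Nat → Int → Int → Option Int → Option Int
  | 0, _, _, ans => ans
  | fuel + 1, lo, hi, ans =>
    if lo ≤ hi then
      if v < PySem.List.pyGetD S (PySem.Int.floordiv (lo + hi) 2) 0 then
        bsearchGo S v fuel (PySem.Int.floordiv (lo + hi) 2 + 1) hi (some (PySem.Int.floordiv (lo + hi) 2))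
      else bsearchGo S v fuel lo (PySem.Int.floordiv (lo + hi) 2 - 1) ans
    else ans

-- the outer 'while i < n' loop of B
def ej2AltGo (arr P S : List Int) : Nat → Nat → Int → Int
  | 0, _, count => count
  | fuel + 1, i, count =>
    if i < arr.length then
      if PySem.List.pyGetD P ((arr.length : Int)) 0 > PySem.List.pyGetD P ((i : Int)) 0 then
        count + 1
      else
        match bsearchGo S (PySem.List.pyGetD P ((i : Int)) 0)
            (((arr.length : Int) - 1 + 1 - ((i : Int) + 1)).toNat)
            ((i : Int) + 1) ((arr.length : Int) - 1) none with
        | none => ej2AltGo arr P S fuel (i + 1) count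
        | some a => ej2AltGo arr P S fuel (a + 1).toNat (count + 1)
    else count

def ej2_alt (arr : List Int) : Int :=
  let P := buildP arr
  let S := sufmax (PySem.List.slice P none (some (arr.length : Int)))
  ej2AltGo arr P S (arr.length + 1) 0 0

-- ===== PRECONDITION & SPEC =====
def Spec_ej2 (arr : List Int) (out : Int) : Prop := out = ej2_alt arr
instance (arr : List Int) (out : Int) : Decidable (Spec_ej2 arr out) := by unfold Spec_ej2; infer_instance

-- ===== CLAIM (what is proved, stated in full; the proofs are below) =====
def Claim_equal_ej2 : Prop := ∀ (arr : List Int), Dom_ej2 arr → Spec_ej2 arr (ej2 arr)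

-- ===== LEMMAS AND PROOFS =====

-- prefix sums: pfs arr k = sum of the first k elements
def pfs (arr : List Int) (k : Nat) : Int := (arr.take k).sum

-- a "crossing" at j (A's punto_de_quiebre condition) and a "hit" at j (running sum positive)
def crossB (arr : List Int) (i j : Nat) : Bool := decide (pfs arr i < pfs arr j ∧ pfs arr (j + 1) ≤ pfs arr i)
def hitB (arr : List Int) (i j : Nat) : Bool := decide (i < j ∧ pfs arr i < pfs arr j)

def maxCross (arr : List Int) (i m : Nat) : Option Nat :=
  ((List.range' m (arr.length - m)).filter (crossB arr i)).getLast?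

def Mi (arr : List Int) (i : Nat) : Option Nat :=
  ((List.range' 0 arr.length).filter (hitB arr i)).getLast?

theorem pfs_succ (arr : List Int) (k : Nat) (h : k < arr.length) :
    pfs arr (k + 1) = pfs arr k + arr.getD k 0 := by
  unfold pfs
  rw [List.take_add_one, List.sum_append]
  congr 1
  simp [List.getD_eq_getElem?_getD, List.getElem?_eq_getElem h]

theorem filter_range'_eq_nil_iff (p : Nat → Bool) (a k : Nat) :
    (List.range' a k).filter p = [] ↔ ∀ y, a ≤ y → y < a + k → ¬ p y = true := by
  rw [List.filter_eq_nil_iff]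
  constructor
  · intro h y h1 h2; exact h y (List.mem_range'.2 ⟨y - a, by omega, by omega⟩)
  · intro h y hy
    obtain ⟨i, hi, rfl⟩ := List.mem_range'.1 hy
    exact h _ (by omega) (by omega)

theorem getLast?_filter_range'_eq_some (p : Nat → Bool) (a k : Nat) : ∀ (x : Nat),
    ((List.range' a k).filter p).getLast? = some x ↔
      (a ≤ x ∧ x < a + k ∧ p x = true ∧ ∀ y, a ≤ y → y < a + k → p y = true → y ≤ x) := by
  induction k with
  | zero => intro x; simp; omega
  | succ k ih =>
    intro x
    rw [List.range'_concat, List.filter_append, List.getLast?_append]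
    by_cases hp : p (a + 1 * k) = true
    · simp only [List.filter_cons, List.filter_nil, hp, if_pos, List.getLast?_singleton]
      constructor
      · intro h
        obtain rfl : a + 1 * k = x := by simpa using h
        exact ⟨by omega, by omega, by simpa using hp, fun y _ h2 _ => by omega⟩
      · intro ⟨h1, h2, h3, h4⟩
        have := h4 (a + 1 * k) (by omega) (by omega) hp
        have : x = a + 1 * k := by omega
        simp [this]
    · simp only [List.filter_cons, List.filter_nil, hp, if_neg, Bool.false_eq_true,
        not_false_iff, List.getLast?_nil]
      rw [Option.none_or, ih x]
      constructor
      · intro ⟨h1, h2, h3, h4⟩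
        refine ⟨h1, by omega, h3, fun y hy1 hy2 hy3 => ?_⟩
        by_cases hyk : y < a + k
        · exact h4 y hy1 hyk hy3
        · have : y = a + 1 * k := by omega
          rw [this] at hy3; exact absurd hy3 hp
      · intro ⟨h1, h2, h3, h4⟩
        have hxk : x < a + k := by
          by_contra hc
          have : x = a + 1 * k := by omega
          rw [this] at h3; exact absurd h3 hp
        exact ⟨h1, hxk, h3, fun y hy1 hy2 hy3 => h4 y hy1 (by omega) hy3⟩

theorem Mi_bounds (arr : List Int) (i j : Nat) (h : Mi arr i = some j) :
    i < j ∧ j < arr.length := by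
  unfold Mi at h
  have hx := ((getLast?_filter_range'_eq_some _ 0 arr.length j).1 h)
  have := of_decide_eq_true hx.2.2.1
  exact ⟨this.1, by omega⟩

-- reference count: what both loops compute
def specGo (arr : List Int) (i : Nat) : Int :=
  if i < arr.length then
    if pfs arr i < pfs arr arr.length then 1
    else
      match hj : Mi arr i with
      | some j => 1 + specGo arr (j + 1)
      | none => specGo arr (i + 1)
  else 0
termination_by arr.length - i
decreasing_by
  · have := Mi_bounds arr i j hj; omega
  · omega

theorem maxCross_step (arr : List Int) (i m : Nat) (h : m < arr.length) :
    maxCross arr i m = (maxCross arr i (m + 1)).or (if crossB arr i m then some m else none) := by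
  unfold maxCross
  have hd : List.range' m (arr.length - m) = [m] ++ List.range' (m + 1) (arr.length - (m + 1)) := by
    have : arr.length - m = (arr.length - (m + 1)) + 1 := by omega
    rw [this, List.range'_succ]
    simp
  rw [hd, List.filter_append, List.getLast?_append]
  by_cases hc : crossB arr i m = true
  · simp [hc]
  · simp [hc]

theorem inner_fold (arr : List Int) (i : Nat) (c : Nat) :
    ∀ (m : Nat) (pq0 : Option Int), m + c = arr.length → i ≤ m →
    ((PySem.List.pyRange (m : Int) (arr.length : Int) 1).foldl
      (fun st j =>
        (st.1 + PySem.List.pyGetD arr j 0,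
         if 0 < st.1 then
           (if st.1 + PySem.List.pyGetD arr j 0 ≤ 0 then some j else st.2)
         else st.2))
      (pfs arr m - pfs arr i, pq0))
    = (pfs arr arr.length - pfs arr i,
       ((maxCross arr i m).map (fun j : Nat => (j : Int))).or pq0) := by
  induction c with
  | zero =>
    intro m pq0 hm _
    obtain rfl : m = arr.length := by omega
    rw [PySem.List.pyRange_one_eq_nil (le_refl _)]
    unfold maxCross
    simp
  | succ c ih =>
    intro m pq0 hm him
    have hmn : m < arr.length := by omega
    rw [PySem.List.pyRange_one_cons (by exact_mod_cast hmn)]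
    rw [List.foldl_cons]
    have hcast : ((m : Int) + 1) = ((m + 1 : Nat) : Int) := by push_cast; ring
    have hget : PySem.List.pyGetD arr (m : Int) 0 = arr.getD m 0 := PySem.List.pyGetD_natCast arr m 0
    have hstep :
        ((pfs arr m - pfs arr i + PySem.List.pyGetD arr (m : Int) 0,
          if 0 < pfs arr m - pfs arr i then
            (if pfs arr m - pfs arr i + PySem.List.pyGetD arr (m : Int) 0 ≤ 0 then some ((m : Int)) else pq0)
          else pq0) : Int × Option Int)
        = (pfs arr (m + 1) - pfs arr i,
           (if crossB arr i m then some ((m : Int)) else pq0)) := by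
      rw [hget]
      have hp1 : pfs arr m - pfs arr i + arr.getD m 0 = pfs arr (m + 1) - pfs arr i := by
        rw [pfs_succ arr m hmn]; ring
      rw [hp1]
      congr 1
      unfold crossB
      by_cases h1 : pfs arr i < pfs arr m
      · by_cases h2 : pfs arr (m + 1) ≤ pfs arr i
        · simp [h1, h2]
        · simp [h1, h2]
      · simp [h1]
    rw [hstep, hcast]
    rw [ih (m + 1) (if crossB arr i m then some ((m : Int)) else pq0) (by omega) (by omega)]
    rw [maxCross_step arr i m hmn]
    congr 1
    rw [Option.map_or, Option.or_assoc]
    congr 1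
    by_cases hc : crossB arr i m = true
    · simp [hc]
    · simp [hc]

theorem ej2Inner_eq (arr : List Int) (i : Nat) (h : i ≤ arr.length) :
    ej2Inner arr i = (pfs arr arr.length - pfs arr i,
      (maxCross arr i i).map (fun j : Nat => (j : Int))) := by
  unfold ej2Inner
  have := inner_fold arr i (arr.length - i) i none (by omega) (le_refl i)
  simpa using this

theorem maxCross_eq_Mi (arr : List Int) (i : Nat) (hle : i ≤ arr.length)
    (h : pfs arr arr.length ≤ pfs arr i) : maxCross arr i i = Mi arr i := by
  unfold maxCross Mi
  cases hMi : ((List.range' 0 arr.length).filter (hitB arr i)).getLast? with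
  | none =>
    rw [List.getLast?_eq_none_iff] at hMi ⊢
    rw [filter_range'_eq_nil_iff] at hMi ⊢
    intro y hy1 hy2 hy3
    have hcr := of_decide_eq_true hy3
    have hne : i ≠ y := by
      intro hiy; rw [← hiy] at hcr; exact absurd hcr.1 (lt_irrefl _)
    exact hMi y (by omega) (by omega) (by simp only [hitB, decide_eq_true_eq]; exact ⟨by omega, hcr.1⟩)
  | some j =>
    have hx := (getLast?_filter_range'_eq_some (hitB arr i) 0 arr.length j).1 hMi
    have hhit := of_decide_eq_true hx.2.2.1
    rw [getLast?_filter_range'_eq_some]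
    refine ⟨by omega, by omega, ?_, ?_⟩
    · unfold crossB
      simp only [decide_eq_true_eq]
      refine ⟨hhit.2, ?_⟩
      by_cases hjn : j + 1 < arr.length
      · by_contra hgt
        rw [not_le] at hgt
        have := hx.2.2.2 (j + 1) (by omega) (by omega)
          (by simp only [hitB, decide_eq_true_eq]; exact ⟨by omega, hgt⟩)
        omega
      · have : j + 1 = arr.length := by omega
        rw [this]; exact h
    · intro y hy1 hy2 hy3
      have hcr := of_decide_eq_true hy3
      have hne : i ≠ y := by
        intro hiy; rw [← hiy] at hcr; exact absurd hcr.1 (lt_irrefl _)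
      exact hx.2.2.2 y (by omega) (by omega)
        (by simp only [hitB, decide_eq_true_eq]; exact ⟨by omega, hcr.1⟩)

theorem A_go (arr : List Int) :
    ∀ (fuel : Nat) (i : Nat) (subs : List (List Int)), arr.length - i < fuel →
      ((ej2Go arr fuel i subs).length : Int) = (subs.length : Int) + specGo arr i := by
  intro fuel
  induction fuel with
  | zero => intro i subs h; exact absurd h (by omega)
  | succ fuel ih =>
    intro i subs hfi
    rw [ej2Go, specGo]
    by_cases hlt : i < arr.length
    · rw [if_pos hlt, if_pos hlt]
      have hinner := ej2Inner_eq arr i (by omega)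
      by_cases hpos : pfs arr i < pfs arr arr.length
      · rw [if_pos (by rw [hinner]; simp; omega), if_pos hpos]
        simp
      · rw [if_neg (by rw [hinner]; simp; omega), if_neg hpos]
        have hM : (ej2Inner arr i).2 = (Mi arr i).map (fun j : Nat => (j : Int)) := by
          rw [hinner, maxCross_eq_Mi arr i (by omega) (by omega)]
        split
        · -- (ej2Inner arr i).2 = some pq
          rename_i pq hpq
          rw [hpq] at hM
          cases hMi : Mi arr i with
          | none => rw [hMi] at hM; simp at hM
          | some j =>
            rw [hMi] at hM
            obtain rfl : (j : Int) = pq := by simpa using hM.symm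
            have hb := Mi_bounds arr i j hMi
            have htn : (((j : Int)) + 1).toNat = j + 1 := by omega
            rw [htn]
            have hrec := ih (j + 1)
              (subs ++ [PySem.List.slice arr (some (i : Int)) (some ((j : Int)))]) (by omega)
            rw [hrec]
            split
            · rename_i j' hj'
              obtain rfl : j = j' := by simpa using hj'
              simp only [List.length_append, List.length_singleton]
              push_cast
              ring
            · rename_i hj'
              simp at hj'
        · -- (ej2Inner arr i).2 = none
          rename_i hpq
          rw [hpq] at hM
          cases hMi : Mi arr i with
          | some j => rw [hMi] at hM; simp at hM
          | none =>
            have hrec := ih (i + 1) subs (by omega)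
            rw [hrec]
    · rw [if_neg hlt, if_neg hlt]
      simp

def specScan (a : Int) : List Int → List Int
  | [] => [a]
  | x :: xs => a :: specScan (a + x) xs

theorem buildP_gen (xs : List Int) : ∀ (P0 : List Int) (a : Int),
    xs.foldl (fun P x => P ++ [PySem.List.pyGetD P (-1) 0 + x]) (P0 ++ [a]) = P0 ++ specScan a xs := by
  induction xs with
  | nil => intro P0 a; simp [specScan]
  | cons x xs ih =>
    intro P0 a
    rw [List.foldl_cons, PySem.List.pyGetD_neg_one_append_singleton]
    rw [ih (P0 ++ [a]) (a + x)]
    simp [specScan]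

theorem buildP_eq (arr : List Int) : buildP arr = specScan 0 arr := by
  have := buildP_gen arr [] 0
  simpa [buildP] using this

theorem length_specScan (xs : List Int) : ∀ a, (specScan a xs).length = xs.length + 1 := by
  induction xs with
  | nil => intro a; simp [specScan]
  | cons x xs ih => intro a; simp [specScan, ih]

theorem specScan_getD (xs : List Int) : ∀ (a : Int) (k : Nat), k ≤ xs.length →
    (specScan a xs).getD k 0 = a + pfs xs k := by
  induction xs with
  | nil =>
    intro a k hk
    obtain rfl : k = 0 := by simpa using hk
    simp [specScan, pfs]
  | cons x xs ih =>
    intro a k hk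
    cases k with
    | zero => simp [specScan, pfs]
    | succ k =>
      simp only [specScan, List.getD_cons_succ]
      rw [ih (a + x) k (by simpa using hk)]
      simp [pfs, List.take_succ_cons]
      ring

theorem length_buildP (arr : List Int) : (buildP arr).length = arr.length + 1 := by
  rw [buildP_eq, length_specScan]

theorem buildP_getD (arr : List Int) (k : Nat) (hk : k ≤ arr.length) :
    (buildP arr).getD k 0 = pfs arr k := by
  rw [buildP_eq, specScan_getD arr 0 k hk]
  simp

theorem sufmax_aux :
    ∀ (l : List Int) (st : List Int × Option Int), st.2 = st.1.getLast? →
      (l.foldl (fun (st : List Int × Option Int) p =>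
        let m := match st.2 with | none => p | some q => max p q
        (st.1 ++ [m], some m)) st).2
      = (l.foldl (fun (st : List Int × Option Int) p =>
        let m := match st.2 with | none => p | some q => max p q
        (st.1 ++ [m], some m)) st).1.getLast? := by
  intro l
  induction l with
  | nil => intro st h; simpa using h
  | cons p l ih =>
    intro st h
    rw [List.foldl_cons]
    apply ih
    simp

theorem sufmax_cons (p : Int) (ps : List Int) :
    sufmax (p :: ps) = (match (sufmax ps).head? with | none => p | some q => max p q) :: sufmax ps := by
  unfold sufmax
  rw [List.reverse_cons, List.foldl_append]
  have haux := sufmax_aux ps.reverse ([], none) (by simp)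
  set F := ps.reverse.foldl (fun (st : List Int × Option Int) p =>
      let m := match st.2 with | none => p | some q => max p q
      (st.1 ++ [m], some m)) (([], none) : List Int × Option Int) with hF
  simp only [List.foldl_cons, List.foldl_nil]
  have hh : (F.1.reverse).head? = F.2 := by rw [List.head?_reverse]; exact haux.symm
  show ((F.1 ++ [match F.2 with | none => p | some q => max p q],
        some (match F.2 with | none => p | some q => max p q)) : List Int × Option Int).1.reverse
      = (match F.1.reverse.head? with | none => p | some q => max p q) :: F.1.reverse
  rw [hh]
  simp

theorem sufmax_nil : sufmax ([] : List Int) = [] := rfl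

theorem length_sufmax (ps : List Int) : (sufmax ps).length = ps.length := by
  induction ps with
  | nil => rfl
  | cons p ps ih => rw [sufmax_cons]; simp [ih]

theorem head?_eq_getD (l : List Int) (h : l ≠ []) : l.head? = some (l.getD 0 0) := by
  cases l with
  | nil => exact absurd rfl h
  | cons x xs => rfl

theorem sufmax_getD_gt_iff (ps : List Int) : ∀ (v : Int) (k : Nat), k < ps.length →
    (v < (sufmax ps).getD k 0 ↔ ∃ j, k ≤ j ∧ j < ps.length ∧ v < ps.getD j 0) := by
  induction ps with
  | nil => intro v k hk; simp at hk
  | cons p ps ih =>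
    intro v k hk
    rw [sufmax_cons]
    cases k with
    | zero =>
      by_cases hps : ps = []
      · subst hps
        rw [sufmax_nil]
        simp
      · have hlen : 0 < ps.length := List.length_pos_iff.2 hps
        have hne : sufmax ps ≠ [] := by
          intro hcon
          have := length_sufmax ps
          rw [hcon] at this
          simp at this
          omega
        rw [head?_eq_getD _ hne]
        simp only [List.getD_cons_zero]
        rw [lt_max_iff]
        constructor
        · rintro (h1 | h1)
          · exact ⟨0, le_refl _, by simp, by simpa using h1⟩
          · obtain ⟨j, hj1, hj2, hj3⟩ := (ih v 0 hlen).1 h1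
            exact ⟨j + 1, by omega, by simpa using hj2, by simpa using hj3⟩
        · rintro ⟨j, hj1, hj2, hj3⟩
          cases j with
          | zero => left; simpa using hj3
          | succ j =>
            right
            exact (ih v 0 hlen).2 ⟨j, by omega, by simpa using hj2, by simpa using hj3⟩
    | succ k =>
      simp only [List.getD_cons_succ]
      rw [ih v k (by simpa using hk)]
      constructor
      · rintro ⟨j, hj1, hj2, hj3⟩
        exact ⟨j + 1, by omega, by simpa using hj2, by simpa using hj3⟩
      · rintro ⟨j, hj1, hj2, hj3⟩
        cases j with
        | zero => omega
        | succ j => exact ⟨j, by omega, by simpa using hj2, by simpa using hj3⟩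


theorem pyGetD_toNat (S : List Int) (m : Int) (h0 : 0 ≤ m) :
    PySem.List.pyGetD S m 0 = S.getD m.toNat 0 := by
  have h : m = ((m.toNat : Nat) : Int) := by omega
  conv_lhs => rw [h]
  rw [PySem.List.pyGetD_natCast]

theorem bsearchGo_char (S : List Int) (v : Int) (lo0 hi0 : Int)
    (hlo0 : 0 ≤ lo0) (hhi0 : hi0 < (S.length : Int))
    (hmono : ∀ a b : Nat, a ≤ b → b < S.length → v < S.getD b 0 → v < S.getD a 0) :
    ∀ (fuel : Nat) (lo hi : Int) (ans : Option Int), (hi + 1 - lo).toNat ≤ fuel →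
      lo0 ≤ lo → hi ≤ hi0 → lo ≤ hi + 1 →
      (ans = none → lo = lo0) →
      (∀ a : Int, ans = some a → lo0 ≤ a ∧ a = lo - 1 ∧ v < S.getD a.toNat 0) →
      (∀ j : Int, hi < j → j ≤ hi0 → ¬ v < S.getD j.toNat 0) →
      ((bsearchGo S v fuel lo hi ans = none → ∀ j : Int, lo0 ≤ j → j ≤ hi0 → ¬ v < S.getD j.toNat 0) ∧
       (∀ m : Int, bsearchGo S v fuel lo hi ans = some m →
          lo0 ≤ m ∧ m ≤ hi0 ∧ v < S.getD m.toNat 0 ∧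
          ∀ j : Int, lo0 ≤ j → j ≤ hi0 → v < S.getD j.toNat 0 → j ≤ m)) := by
  intro fuel
  induction fuel with
  | zero =>
    intro lo hi ans hfuel h1 h2 h3 h4 h5 h6
    rw [bsearchGo]
    constructor
    · rintro rfl j hj1 hj2
      exact h6 j (by have := h4 rfl; omega) hj2
    · intro m hm
      obtain ⟨ha1, ha2, ha3⟩ := h5 m hm
      refine ⟨ha1, by omega, ha3, ?_⟩
      intro j hj1 hj2 hj3
      by_contra hc
      exact h6 j (by omega) hj2 hj3
  | succ fuel ih =>
    intro lo hi ans hfuel h1 h2 h3 h4 h5 h6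
    rw [bsearchGo]
    by_cases hle : lo ≤ hi
    · rw [if_pos hle]
      have hmid := PySem.Int.floordiv_two_mid_bounds hle
      set mid := PySem.Int.floordiv (lo + hi) 2 with hmiddef
      have hmid0 : 0 ≤ mid := by omega
      have hmidlen : mid.toNat < S.length := by omega
      rw [pyGetD_toNat S mid hmid0]
      by_cases hv : v < S.getD mid.toNat 0
      · rw [if_pos hv]
        exact ih (mid + 1) hi (some mid) (by omega) (by omega) h2 (by omega)
          (by intro hcon; simp at hcon)
          (by rintro a ha
              obtain rfl : mid = a := by simpa using ha
              exact ⟨by omega, by ring, hv⟩)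
          h6
      · rw [if_neg hv]
        refine ih lo (mid - 1) ans (by omega) h1 (by omega) (by omega) h4 h5 ?_
        intro j hj1 hj2 hjv
        by_cases hjhi : j ≤ hi
        · have hjm : mid.toNat ≤ j.toNat := by omega
          have hjlen : j.toNat < S.length := by omega
          exact hv (hmono mid.toNat j.toNat hjm hjlen hjv)
        · exact h6 j (by omega) hj2 hjv
    · rw [if_neg hle]
      constructor
      · rintro rfl j hj1 hj2
        exact h6 j (by have := h4 rfl; omega) hj2
      · intro m hm
        obtain ⟨ha1, ha2, ha3⟩ := h5 m hm
        refine ⟨ha1, by omega, ha3, ?_⟩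
        intro j hj1 hj2 hj3
        by_contra hc
        exact h6 j (by omega) hj2 hj3

theorem getD_take (P : List Int) (n j : Nat) (h : j < n) :
    (P.take n).getD j 0 = P.getD j 0 := by
  rw [List.getD_eq_getElem?_getD, List.getD_eq_getElem?_getD, List.getElem?_take, if_pos h]

theorem B_go (arr : List Int) :
    ∀ (fuel : Nat) (i : Nat) (count : Int), arr.length - i < fuel →
      ej2AltGo arr (buildP arr) (sufmax (PySem.List.slice (buildP arr) none (some (arr.length : Int)))) fuel i count
        = count + specGo arr i := by
  set P := buildP arr with hPdef
  set S := sufmax (PySem.List.slice P none (some (arr.length : Int))) with hSdef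
  have hslice : PySem.List.slice P none (some (arr.length : Int)) = P.take arr.length :=
    PySem.List.slice_to_natCast P arr.length
  have hPlen : P.length = arr.length + 1 := length_buildP arr
  have hSlen : S.length = arr.length := by
    rw [hSdef, hslice, length_sufmax, List.length_take]
    omega
  have hP : ∀ k : Nat, k ≤ arr.length → PySem.List.pyGetD P ((k : Nat) : Int) 0 = pfs arr k := by
    intro k hk
    rw [PySem.List.pyGetD_natCast, hPdef, buildP_getD arr k hk]
  have hSgt : ∀ (v : Int) (k : Nat), k < arr.length →
      (v < S.getD k 0 ↔ ∃ j, k ≤ j ∧ j < arr.length ∧ v < pfs arr j) := by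
    intro v k hk
    rw [hSdef, hslice]
    have := sufmax_getD_gt_iff (P.take arr.length) v k (by rw [List.length_take]; omega)
    rw [this]
    constructor
    · rintro ⟨j, hj1, hj2, hj3⟩
      rw [List.length_take] at hj2
      refine ⟨j, hj1, by omega, ?_⟩
      rw [getD_take P arr.length j (by omega)] at hj3
      rw [← buildP_getD arr j (by omega)]
      exact hj3
    · rintro ⟨j, hj1, hj2, hj3⟩
      refine ⟨j, hj1, by rw [List.length_take]; omega, ?_⟩
      rw [getD_take P arr.length j (by omega), buildP_getD arr j (by omega)]
      exact hj3
  have hmono : ∀ (v : Int) (a b : Nat), a ≤ b → b < S.length → v < S.getD b 0 → v < S.getD a 0 := by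
    intro v a b hab hb hv
    rw [hSlen] at hb
    obtain ⟨j, hj1, hj2, hj3⟩ := (hSgt v b hb).1 hv
    exact (hSgt v a (by omega)).2 ⟨j, by omega, hj2, hj3⟩
  intro fuel
  induction fuel with
  | zero => intro i count h; exact absurd h (by omega)
  | succ fuel ih =>
    intro i count hfi
    rw [ej2AltGo, specGo]
    by_cases hlt : i < arr.length
    · rw [if_pos hlt, if_pos hlt]
      have e1 := hP i (by omega)
      have e2 := hP arr.length (le_refl _)
      by_cases hpos : pfs arr i < pfs arr arr.length
      · rw [if_pos (by rw [gt_iff_lt, e1, e2]; exact hpos), if_pos hpos]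
      · rw [if_neg (by rw [gt_iff_lt, e1, e2]; exact hpos), if_neg hpos]
        have hchar := bsearchGo_char S (pfs arr i) ((i : Int) + 1) ((arr.length : Int) - 1)
          (by omega) (by omega) (hmono (pfs arr i))
          (((arr.length : Int) - 1 + 1 - ((i : Int) + 1)).toNat)
          ((i : Int) + 1) ((arr.length : Int) - 1) none (le_refl _)
          (le_refl _) (le_refl _) (by omega)
          (fun _ => rfl) (by intro a ha; simp at ha) (by intro j hj1 hj2; omega)
        split
        · -- bsearch returned none
          rename_i hans
          rw [e1] at hans
          have hnone := hchar.1 hans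
          have hMi : Mi arr i = none := by
            unfold Mi
            rw [List.getLast?_eq_none_iff, filter_range'_eq_nil_iff]
            intro y hy1 hy2 hy3
            have hhit := of_decide_eq_true hy3
            have hTy : pfs arr i < S.getD y 0 := by
              rw [hSgt (pfs arr i) y (by omega)]
              exact ⟨y, le_refl _, by omega, hhit.2⟩
            have := hnone (y : Int) (by omega) (by omega)
            rw [Int.toNat_natCast] at this
            exact this hTy
          have hrec := ih (i + 1) count (by omega)
          rw [hrec]
          split
          · rename_i j' hj'
            rw [hMi] at hj'; simp at hj'
          · rfl
        · -- bsearch returned some a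
          rename_i a hans
          rw [e1] at hans
          obtain ⟨ha1, ha2, ha3, ha4⟩ := hchar.2 a hans
          have ha0 : 0 ≤ a := by omega
          have hTa := (hSgt (pfs arr i) a.toNat (by omega)).1 ha3
          obtain ⟨j0, hj01, hj02, hj03⟩ := hTa
          have hj0a : (j0 : Int) ≤ a := by
            apply ha4 (j0 : Int) (by omega) (by omega)
            rw [Int.toNat_natCast]
            rw [hSgt (pfs arr i) j0 (by omega)]
            exact ⟨j0, le_refl _, by omega, hj03⟩
          obtain rfl : j0 = a.toNat := by omega
          have hMi : Mi arr i = some a.toNat := by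
            unfold Mi
            rw [getLast?_filter_range'_eq_some]
            refine ⟨by omega, by omega, ?_, ?_⟩
            · simp only [hitB, decide_eq_true_eq]
              exact ⟨by omega, hj03⟩
            · intro y hy1 hy2 hy3
              have hhit := of_decide_eq_true hy3
              have : (y : Int) ≤ a := by
                apply ha4 (y : Int) (by omega) (by omega)
                rw [Int.toNat_natCast]
                rw [hSgt (pfs arr i) y (by omega)]
                exact ⟨y, le_refl _, by omega, hhit.2⟩
              omega
          have htn : (a + 1).toNat = a.toNat + 1 := by omega
          rw [htn]
          have hrec := ih (a.toNat + 1) (count + 1) (by omega)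
          rw [hrec]
          split
          · rename_i j' hj'
            rw [hMi] at hj'
            obtain rfl : a.toNat = j' := by simpa using hj'
            ring
          · rename_i hj'
            rw [hMi] at hj'; simp at hj'
    · rw [if_neg hlt, if_neg hlt]
      simp

-- ===== VERDICT (by name: the statement is the Claim_ definition above) =====
theorem ej2_spec : Claim_equal_ej2 := by
  intro arr _
  unfold Spec_ej2 ej2 ej2_alt
  have hA := A_go arr (arr.length + 1) 0 [] (by omega)
  have hB := B_go arr (arr.length + 1) 0 0 (by omega)
  simp only [List.length_nil, Int.natCast_zero, zero_add] at hA hB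
  rw [hA]; rw [hB]
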